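-- pv_equiv track=rewrite | github.com/enzomaruffa/pixel-perfect | src/ui/utils/config_serialization.py | get_pipeline_categories
-- ===== SOURCE A (Python) =====
-- from typing import Any
--
-- def get_pipeline_categories(operations: list[dict[str, Any]]) -> list[str]:
--     """Extract categories from pipeline operations."""
--
--     categories = set()
--
--     for op in operations:
--         class_name = op.get("class_name", "")
--
--         if class_name.startswith("Pixel"):
--             categories.add("Pixel")
--         elif class_name.startswith("Row"):
--             categories.add("Row")
--         elif class_name.startswith("Column"):
--             categories.add("Column")
--         elif class_name.startswith("Block"):
--             categories.add("Block")
--         elif class_name.startswith("Aspect"):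
--             categories.add("Aspect")
--         elif class_name.startswith("Channel"):
--             categories.add("Channel")
--         elif class_name in ("GridWarp", "PerspectiveStretch", "RadialStretch"):
--             categories.add("Geometric")
--         elif class_name in ("Mosaic", "Dither"):
--             categories.add("Pattern")
--
--     return sorted(categories)
-- ===== SOURCE B (Python) =====
-- _SORTED_CATEGORIES = ["Aspect", "Block", "Channel", "Column",
--                       "Geometric", "Pattern", "Pixel", "Row"]
--
-- _EXACT_NAMES = {
--     "Geometric": ("GridWarp", "PerspectiveStretch", "RadialStretch"),
--     "Pattern": ("Mosaic", "Dither"),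
-- }
--
--
-- def _matches(name, category):
--     exact = _EXACT_NAMES.get(category)
--     if exact is not None:
--         return name in exact
--     return name.startswith(category)
--
--
-- def get_pipeline_categories(operations: list[dict[str, object]]) -> list[str]:
--     """Extract categories from pipeline operations."""
--     names = [op.get("class_name", "") for op in operations]
--     return [cat for cat in _SORTED_CATEGORIES
--             if any(_matches(name, cat) for name in names)]
-- ===== Notes on version B (the rewrite author's own statement) =====
-- stated objective: alternative
-- what changed: Instead of one pass over operations building a set and sorting it, B filters the fixed already-sorted universe of 8 category names, keeping each category matched by some operation's class_name (exact-name tuple or prefix test), so no set and no sort are needed.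
import Mathlib
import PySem

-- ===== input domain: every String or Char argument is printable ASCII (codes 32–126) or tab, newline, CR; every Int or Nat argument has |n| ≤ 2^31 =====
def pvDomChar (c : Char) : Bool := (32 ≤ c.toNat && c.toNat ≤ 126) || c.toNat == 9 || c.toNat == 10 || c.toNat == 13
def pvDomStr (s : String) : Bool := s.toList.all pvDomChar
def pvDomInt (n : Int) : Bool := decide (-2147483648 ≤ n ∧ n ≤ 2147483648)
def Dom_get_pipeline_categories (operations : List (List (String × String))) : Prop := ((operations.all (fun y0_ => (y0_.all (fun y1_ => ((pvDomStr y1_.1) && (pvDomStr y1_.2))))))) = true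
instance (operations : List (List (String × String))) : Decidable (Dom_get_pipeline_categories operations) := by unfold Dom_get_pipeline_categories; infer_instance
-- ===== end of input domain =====

-- B inverts the loop: instead of a pass over operations building a set that is then sorted,
-- it filters the fixed already-sorted universe of 8 category names by "some operation matches".

-- ===== PORT A =====
def get_pipeline_categories (operations : List (List (String × String))) : List String :=
  let categories : PySem.Set String :=
    operations.foldl (fun categories op =>
      let class_name := (PySem.Dict.mk op).getD "class_name" ""
      if PySem.Str.startswith class_name "Pixel" then PySem.Set.add categories "Pixel"
      else if PySem.Str.startswith class_name "Row" then PySem.Set.add categories "Row"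
      else if PySem.Str.startswith class_name "Column" then PySem.Set.add categories "Column"
      else if PySem.Str.startswith class_name "Block" then PySem.Set.add categories "Block"
      else if PySem.Str.startswith class_name "Aspect" then PySem.Set.add categories "Aspect"
      else if PySem.Str.startswith class_name "Channel" then PySem.Set.add categories "Channel"
      else if class_name = "GridWarp" ∨ class_name = "PerspectiveStretch" ∨ class_name = "RadialStretch" then
        PySem.Set.add categories "Geometric"
      else if class_name = "Mosaic" ∨ class_name = "Dither" then PySem.Set.add categories "Pattern"
      else categories) PySem.Set.empty
  PySem.List.sorted categories (fun x => x) false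

-- ===== PORT B =====
def pvSortedCategories : List String :=
  ["Aspect", "Block", "Channel", "Column", "Geometric", "Pattern", "Pixel", "Row"]

def pvExactNames : PySem.Dict String (List String) :=
  PySem.Dict.mk [("Geometric", ["GridWarp", "PerspectiveStretch", "RadialStretch"]),
                 ("Pattern", ["Mosaic", "Dither"])]

def pvMatches (name category : String) : Bool :=
  match pvExactNames.get? category with
  | some exact => exact.contains name
  | none => PySem.Str.startswith name category

def get_pipeline_categories_alt (operations : List (List (String × String))) : List String :=
  let names := operations.map (fun op => (PySem.Dict.mk op).getD "class_name" "")
  pvSortedCategories.filter (fun cat => names.any (fun name => pvMatches name cat))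

-- ===== PRECONDITION & SPEC =====
def Spec_get_pipeline_categories (operations : List (List (String × String))) (out : List String) : Prop := out = get_pipeline_categories_alt operations
instance (operations : List (List (String × String))) (out : List String) : Decidable (Spec_get_pipeline_categories operations out) := by unfold Spec_get_pipeline_categories; infer_instance

-- ===== CLAIM (what is proved, stated in full; the proofs are below) =====
def Claim_equal_get_pipeline_categories : Prop := ∀ (operations : List (List (String × String))), Dom_get_pipeline_categories operations → Spec_get_pipeline_categories operations (get_pipeline_categories operations)

-- ===== LEMMAS AND PROOFS =====

-- the class name an operation contributes
def pvName (op : List (String × String)) : String := (PySem.Dict.mk op).getD "class_name" ""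

-- A's cascade as a function from a class name to the category it registers (if any)
def pvCatA (n : String) : Option String :=
  if PySem.Str.startswith n "Pixel" then some "Pixel"
  else if PySem.Str.startswith n "Row" then some "Row"
  else if PySem.Str.startswith n "Column" then some "Column"
  else if PySem.Str.startswith n "Block" then some "Block"
  else if PySem.Str.startswith n "Aspect" then some "Aspect"
  else if PySem.Str.startswith n "Channel" then some "Channel"
  else if n = "GridWarp" ∨ n = "PerspectiveStretch" ∨ n = "RadialStretch" then some "Geometric"
  else if n = "Mosaic" ∨ n = "Dither" then some "Pattern"
  else none

-- A's loop body, abstracted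
def pvStepA (s : PySem.Set String) (op : List (String × String)) : PySem.Set String :=
  match pvCatA (pvName op) with
  | some c => PySem.Set.add s c
  | none => s

theorem pvStepA_eq (s : PySem.Set String) (op : List (String × String)) :
    (let class_name := (PySem.Dict.mk op).getD "class_name" ""
      if PySem.Str.startswith class_name "Pixel" then PySem.Set.add s "Pixel"
      else if PySem.Str.startswith class_name "Row" then PySem.Set.add s "Row"
      else if PySem.Str.startswith class_name "Column" then PySem.Set.add s "Column"
      else if PySem.Str.startswith class_name "Block" then PySem.Set.add s "Block"
      else if PySem.Str.startswith class_name "Aspect" then PySem.Set.add s "Aspect"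
      else if PySem.Str.startswith class_name "Channel" then PySem.Set.add s "Channel"
      else if class_name = "GridWarp" ∨ class_name = "PerspectiveStretch" ∨ class_name = "RadialStretch" then
        PySem.Set.add s "Geometric"
      else if class_name = "Mosaic" ∨ class_name = "Dither" then PySem.Set.add s "Pattern"
      else s) = pvStepA s op := by
  simp only [pvStepA, pvCatA, pvName]
  split_ifs <;> rfl

theorem pv_mem_fold (ops : List (List (String × String))) (s : PySem.Set String) (c : String) :
    c ∈ ops.foldl pvStepA s ↔ c ∈ s ∨ ∃ op ∈ ops, pvCatA (pvName op) = some c := by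
  induction ops generalizing s with
  | nil => simp
  | cons op rest ih =>
    simp only [List.foldl_cons, ih, List.mem_cons]
    unfold pvStepA
    cases h : pvCatA (pvName op) with
    | none =>
      constructor
      · rintro (h1 | h2)
        · exact Or.inl h1
        · exact Or.inr ⟨h2.choose, ⟨Or.inr h2.choose_spec.1, h2.choose_spec.2⟩⟩
      · rintro (h1 | ⟨o, ho | ho, hc⟩)
        · exact Or.inl h1
        · subst ho; rw [h] at hc; cases hc
        · exact Or.inr ⟨o, ho, hc⟩
    | some d =>
      rw [PySem.Set.mem_add]
      constructor
      · rintro ((h1 | h1) | h2)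
        · exact Or.inl h1
        · exact Or.inr ⟨op, Or.inl rfl, by rw [h, h1]⟩
        · exact Or.inr ⟨h2.choose, ⟨Or.inr h2.choose_spec.1, h2.choose_spec.2⟩⟩
      · rintro (h1 | ⟨o, ho | ho, hc⟩)
        · exact Or.inl (Or.inl h1)
        · subst ho; rw [h] at hc; exact Or.inl (Or.inr (Option.some.inj hc).symm)
        · exact Or.inr ⟨o, ho, hc⟩

theorem pv_nodup_fold (ops : List (List (String × String))) (s : PySem.Set String)
    (hs : s.Nodup) : (ops.foldl pvStepA s).Nodup := by
  induction ops generalizing s with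
  | nil => exact hs
  | cons op rest ih =>
    refine ih _ ?_
    unfold pvStepA
    cases pvCatA (pvName op) with
    | none => exact hs
    | some d => exact PySem.Set.nodup_add s d hs

-- two string prefixes of the same string are comparable; used to refute overlapping branches
theorem pv_startswith_excl (n p q : String)
    (hp : ¬ p.toList <+: q.toList) (hq : ¬ q.toList <+: p.toList)
    (h : PySem.Str.startswith n p = true) : PySem.Str.startswith n q = false := by
  by_contra hne
  have hq' : PySem.Str.startswith n q = true := by
    cases hx : PySem.Str.startswith n q
    · exact absurd hx hne
    · rfl
  have h1 : p.toList <+: n.toList := List.isPrefixOf_iff_prefix.mp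
    (by simpa [PySem.Str.startswith, PySem.Chars.startswith] using h)
  have h2 : q.toList <+: n.toList := List.isPrefixOf_iff_prefix.mp
    (by simpa [PySem.Str.startswith, PySem.Chars.startswith] using hq')
  rcases List.prefix_or_prefix_of_prefix h1 h2 with hc | hc
  · exact hp hc
  · exact hq hc


-- every category the cascade registers lies in the fixed universe
theorem pvCatA_mem (n c : String) (h : pvCatA n = some c) : c ∈ pvSortedCategories := by
  unfold pvCatA at h
  split_ifs at h <;> · rw [Option.some.inj h.symm]; decide

-- B's table-free test agrees with A's cascade, category by category
set_option maxHeartbeats 1600000 in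
theorem pv_matches_iff (n c : String) (hc : c ∈ pvSortedCategories) :
    pvMatches n c = true ↔ pvCatA n = some c := by
  simp only [pvSortedCategories, List.mem_cons, List.not_mem_nil, or_false] at hc
  rcases hc with rfl | rfl | rfl | rfl | rfl | rfl | rfl | rfl
  · -- Aspect
    have hm : pvMatches n "Aspect" = PySem.Str.startswith n "Aspect" := rfl
    rw [hm]; clear hm
    constructor
    · intro h
      unfold pvCatA
      rw [if_neg (ne_true_of_eq_false (pv_startswith_excl n "Aspect" "Pixel" (by decide) (by decide) h)),
        if_neg (ne_true_of_eq_false (pv_startswith_excl n "Aspect" "Row" (by decide) (by decide) h)),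
        if_neg (ne_true_of_eq_false (pv_startswith_excl n "Aspect" "Column" (by decide) (by decide) h)),
        if_neg (ne_true_of_eq_false (pv_startswith_excl n "Aspect" "Block" (by decide) (by decide) h)),
        if_pos h]
    · intro h; unfold pvCatA at h; split_ifs at h <;> simp_all
  · -- Block
    have hm : pvMatches n "Block" = PySem.Str.startswith n "Block" := rfl
    rw [hm]; clear hm
    constructor
    · intro h
      unfold pvCatA
      rw [if_neg (ne_true_of_eq_false (pv_startswith_excl n "Block" "Pixel" (by decide) (by decide) h)),
        if_neg (ne_true_of_eq_false (pv_startswith_excl n "Block" "Row" (by decide) (by decide) h)),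
        if_neg (ne_true_of_eq_false (pv_startswith_excl n "Block" "Column" (by decide) (by decide) h)),
        if_pos h]
    · intro h; unfold pvCatA at h; split_ifs at h <;> simp_all
  · -- Channel
    have hm : pvMatches n "Channel" = PySem.Str.startswith n "Channel" := rfl
    rw [hm]; clear hm
    constructor
    · intro h
      unfold pvCatA
      rw [if_neg (ne_true_of_eq_false (pv_startswith_excl n "Channel" "Pixel" (by decide) (by decide) h)),
        if_neg (ne_true_of_eq_false (pv_startswith_excl n "Channel" "Row" (by decide) (by decide) h)),
        if_neg (ne_true_of_eq_false (pv_startswith_excl n "Channel" "Column" (by decide) (by decide) h)),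
        if_neg (ne_true_of_eq_false (pv_startswith_excl n "Channel" "Block" (by decide) (by decide) h)),
        if_neg (ne_true_of_eq_false (pv_startswith_excl n "Channel" "Aspect" (by decide) (by decide) h)),
        if_pos h]
    · intro h; unfold pvCatA at h; split_ifs at h <;> simp_all
  · -- Column
    have hm : pvMatches n "Column" = PySem.Str.startswith n "Column" := rfl
    rw [hm]; clear hm
    constructor
    · intro h
      unfold pvCatA
      rw [if_neg (ne_true_of_eq_false (pv_startswith_excl n "Column" "Pixel" (by decide) (by decide) h)),
        if_neg (ne_true_of_eq_false (pv_startswith_excl n "Column" "Row" (by decide) (by decide) h)),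
        if_pos h]
    · intro h; unfold pvCatA at h; split_ifs at h <;> simp_all
  · -- Geometric
    have hm : pvMatches n "Geometric" =
        (["GridWarp", "PerspectiveStretch", "RadialStretch"] : List String).contains n := rfl
    rw [hm, List.contains_eq_mem, decide_eq_true_iff]; clear hm
    simp only [List.mem_cons, List.not_mem_nil, or_false]
    constructor
    · rintro (rfl | rfl | rfl) <;> decide
    · intro h; unfold pvCatA at h; split_ifs at h <;> simp_all
  · -- Pattern
    have hm : pvMatches n "Pattern" =
        (["Mosaic", "Dither"] : List String).contains n := rfl
    rw [hm, List.contains_eq_mem, decide_eq_true_iff]; clear hm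
    simp only [List.mem_cons, List.not_mem_nil, or_false]
    constructor
    · rintro (rfl | rfl) <;> decide
    · intro h; unfold pvCatA at h; split_ifs at h <;> simp_all
  · -- Pixel
    have hm : pvMatches n "Pixel" = PySem.Str.startswith n "Pixel" := rfl
    rw [hm]; clear hm
    constructor
    · intro h; unfold pvCatA; rw [h]; exact if_pos rfl
    · intro h; unfold pvCatA at h; split_ifs at h <;> simp_all
  · -- Row
    have hm : pvMatches n "Row" = PySem.Str.startswith n "Row" := rfl
    rw [hm]; clear hm
    constructor
    · intro h
      unfold pvCatA
      rw [if_neg (ne_true_of_eq_false (pv_startswith_excl n "Row" "Pixel" (by decide) (by decide) h)),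
        if_pos h]
    · intro h; unfold pvCatA at h; split_ifs at h <;> simp_all

theorem pv_main (operations : List (List (String × String))) :
    get_pipeline_categories operations = get_pipeline_categories_alt operations := by
  unfold get_pipeline_categories get_pipeline_categories_alt
  have hstep : (fun (categories : PySem.Set String) (op : List (String × String)) =>
      let class_name := (PySem.Dict.mk op).getD "class_name" ""
      if PySem.Str.startswith class_name "Pixel" then PySem.Set.add categories "Pixel"
      else if PySem.Str.startswith class_name "Row" then PySem.Set.add categories "Row"
      else if PySem.Str.startswith class_name "Column" then PySem.Set.add categories "Column"
      else if PySem.Str.startswith class_name "Block" then PySem.Set.add categories "Block"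
      else if PySem.Str.startswith class_name "Aspect" then PySem.Set.add categories "Aspect"
      else if PySem.Str.startswith class_name "Channel" then PySem.Set.add categories "Channel"
      else if class_name = "GridWarp" ∨ class_name = "PerspectiveStretch" ∨ class_name = "RadialStretch" then
        PySem.Set.add categories "Geometric"
      else if class_name = "Mosaic" ∨ class_name = "Dither" then PySem.Set.add categories "Pattern"
      else categories) = pvStepA := by
    funext s op; exact pvStepA_eq s op
  rw [hstep]
  set S : PySem.Set String := operations.foldl pvStepA PySem.Set.empty with hS
  set B : List String := pvSortedCategories.filter (fun cat =>
      (operations.map (fun op => (PySem.Dict.mk op).getD "class_name" "")).any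
        (fun name => pvMatches name cat)) with hB
  have hnodupS : S.Nodup := pv_nodup_fold operations PySem.Set.empty List.nodup_nil
  have hBpairLt : B.Pairwise (· < ·) := by
    refine List.Pairwise.filter _ ?_
    simp [pvSortedCategories, String.lt_iff_toList_lt]
    decide
  have hBnodup : B.Nodup := hBpairLt.imp (fun h => ne_of_lt h)
  have hmem : ∀ c, c ∈ B ↔ c ∈ S := by
    intro c
    rw [hB, hS, pv_mem_fold, List.mem_filter, List.any_eq_true]
    constructor
    · rintro ⟨hc, nm, hnm, hmatch⟩
      rcases List.mem_map.mp hnm with ⟨op, hop, rfl⟩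
      exact Or.inr ⟨op, hop, (pv_matches_iff _ c hc).mp hmatch⟩
    · rintro (h | ⟨op, hop, hc⟩)
      · cases h
      · exact ⟨pvCatA_mem _ _ hc, pvName op, List.mem_map_of_mem hop,
          (pv_matches_iff (pvName op) c (pvCatA_mem _ _ hc)).mpr hc⟩
  have hperm : B.Perm S := (List.perm_ext_iff_of_nodup hBnodup hnodupS).mpr hmem
  exact PySem.List.sorted_eq_of_perm_of_pairwise_lt S B (fun x => x) hperm hBpairLt

-- ===== VERDICT (by name: the statement is the Claim_ definition above) =====
theorem get_pipeline_categories_spec : Claim_equal_get_pipeline_categories := by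
  intro operations _
  exact pv_main operations
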